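-- pv_equiv track=rewrite | github.com/top2dogz/TypeRacer | cats.py | shifty_shifts
-- ===== SOURCE A (Python) =====
-- def shifty_shifts(start, goal, limit):
--     """A diff function for autocorrect that determines how many letters
--     in START need to be substituted to create GOAL, then adds the difference in
--     their lengths.
--     """
--     # BEGIN PROBLEM 6
--     if len(goal) == 0:
--         return 0
--     if len(start) > len(goal):
--         return shifty_shifts(start[:len(start)-1], goal, limit-1) + 1
--     if len(goal) > len(start):
--         return shifty_shifts(start, goal[:len(goal)-1], limit-1) + 1
--     if limit < 0:
--         return 10**8
--     if goal[len(goal)-1] == start[len(start)-1]: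
--         return shifty_shifts(start[:len(start)-1], goal[:len(goal)-1], limit)
--     return shifty_shifts(start[:len(start)-1], goal[:len(goal)-1], limit - 1) + 1
-- ===== SOURCE B (Python) =====
-- def shifty_shifts(start, goal, limit):
--     """Iterative single pass: length difference plus per-position substitutions
--     scanned from the end, tracking the remaining limit."""
--     if len(goal) == 0:
--         return 0
--     n = min(len(start), len(goal))
--     cost = len(start) + len(goal) - 2 * n
--     l = limit - cost
--     for a, b in zip(reversed(start[:n]), reversed(goal[:n])):
--         if l < 0:
--             return cost + 10**8
--         if a != b:
--             cost += 1
--             l -= 1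
--     return cost
-- ===== Notes on version B (the rewrite author's own statement) =====
-- stated objective: faster
-- what changed: Replaces the O(n^2) recursion that rebuilds string slices at every step by a single iterative pass: length difference computed up front, then one reversed zip over the common prefix counting substitutions while tracking the remaining limit.
import Mathlib
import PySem

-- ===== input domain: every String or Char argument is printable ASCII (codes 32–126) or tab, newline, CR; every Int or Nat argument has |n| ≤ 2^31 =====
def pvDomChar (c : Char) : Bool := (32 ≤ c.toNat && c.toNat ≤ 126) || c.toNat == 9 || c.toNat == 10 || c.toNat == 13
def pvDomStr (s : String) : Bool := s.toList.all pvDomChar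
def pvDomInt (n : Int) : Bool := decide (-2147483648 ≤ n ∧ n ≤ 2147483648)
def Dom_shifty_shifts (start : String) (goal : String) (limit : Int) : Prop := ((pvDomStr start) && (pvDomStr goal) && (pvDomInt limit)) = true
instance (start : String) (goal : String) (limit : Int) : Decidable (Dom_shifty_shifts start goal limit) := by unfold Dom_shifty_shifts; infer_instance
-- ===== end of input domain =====

-- B replaces A's slice-rebuilding recursion by one linear reversed-zip pass (objective: faster).

-- ===== PORT A =====
-- s[:len(s)-1] as slice; cited by the port's decreasing_by (it is dropLast)
theorem pv_slice_dropLast (s : List Char) :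
    PySem.List.slice s none (some ((s.length : Int) - 1)) = s.dropLast := by
  cases s with
  | nil => simp [PySem.List.slice]
  | cons x t =>
      have h : ((x :: t).length : Int) - 1 = ((t.length : Nat) : Int) := by
        simp
      rw [h, PySem.List.slice_to_natCast]
      rw [List.dropLast_eq_take]
      simp

def shiftyA (s : List Char) (g : List Char) (l : Int) : Int :=
  if hg : g.length = 0 then 0
  else if h1 : s.length > g.length then
    shiftyA (PySem.List.slice s none (some ((s.length : Int) - 1))) g (l - 1) + 1
  else if h2 : g.length > s.length then
    shiftyA s (PySem.List.slice g none (some ((g.length : Int) - 1))) (l - 1) + 1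
  else if l < 0 then 10 ^ 8
  else if PySem.List.pyGet? g ((g.length : Int) - 1) = PySem.List.pyGet? s ((s.length : Int) - 1) then
    shiftyA (PySem.List.slice s none (some ((s.length : Int) - 1)))
            (PySem.List.slice g none (some ((g.length : Int) - 1))) l
  else
    shiftyA (PySem.List.slice s none (some ((s.length : Int) - 1)))
            (PySem.List.slice g none (some ((g.length : Int) - 1))) (l - 1) + 1
termination_by s.length + g.length
decreasing_by
  all_goals simp [pv_slice_dropLast, List.length_dropLast]
  all_goals omega

def shifty_shifts (start : String) (goal : String) (limit : Int) : Int :=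
  shiftyA start.toList goal.toList limit

-- ===== PORT B =====
def altLoop (ps : List (Char × Char)) (cost : Int) (l : Int) : Int :=
  match ps with
  | [] => cost
  | (a, b) :: rest =>
      if l < 0 then cost + 10 ^ 8
      else if a ≠ b then altLoop rest (cost + 1) (l - 1)
      else altLoop rest cost l

def shifty_shifts_alt (start : String) (goal : String) (limit : Int) : Int :=
  let s := start.toList
  let g := goal.toList
  if g.length = 0 then 0
  else
    let n := min s.length g.length
    let cost : Int := (s.length : Int) + (g.length : Int) - 2 * (n : Int)
    let l := limit - cost
    altLoop (((s.take n).reverse).zip ((g.take n).reverse)) cost l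

-- ===== PRECONDITION & SPEC =====
def Spec_shifty_shifts (start : String) (goal : String) (limit : Int) (out : Int) : Prop := out = shifty_shifts_alt start goal limit
instance (start : String) (goal : String) (limit : Int) (out : Int) : Decidable (Spec_shifty_shifts start goal limit out) := by unfold Spec_shifty_shifts; infer_instance

-- ===== CLAIM (what is proved, stated in full; the proofs are below) =====
def Claim_equal_shifty_shifts : Prop := ∀ (start : String) (goal : String) (limit : Int), Dom_shifty_shifts start goal limit → Spec_shifty_shifts start goal limit (shifty_shifts start goal limit)

-- ===== LEMMAS AND PROOFS =====

-- accumulator of altLoop splits off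
theorem altLoop_accum (ps : List (Char × Char)) (c l : Int) :
    altLoop ps c l = c + altLoop ps 0 l := by
  induction ps generalizing c l with
  | nil => simp [altLoop]
  | cons p t ih =>
      obtain ⟨a, b⟩ := p
      by_cases hl : l < 0
      · simp [altLoop, hl]
      · by_cases hab : a = b
        · simp [altLoop, hl, hab]
          exact ih c l
        · simp [altLoop, hl, hab]
          rw [ih (c + 1), ih 1]
          ring

-- equal-length phase of A is altLoop on the end-first pair list
theorem shiftyA_eq_altLoop (ps : List (Char × Char)) (l : Int) :
    shiftyA ((ps.map Prod.fst).reverse) ((ps.map Prod.snd).reverse) l = altLoop ps 0 l := by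
  induction ps generalizing l with
  | nil => rw [shiftyA]; simp [altLoop]
  | cons p t ih =>
      obtain ⟨a, b⟩ := p
      have hs : ((((a, b) :: t).map Prod.fst).reverse) = (t.map Prod.fst).reverse ++ [a] := by simp
      have hg : ((((a, b) :: t).map Prod.snd).reverse) = (t.map Prod.snd).reverse ++ [b] := by simp
      rw [hs, hg]
      set s' := (t.map Prod.fst).reverse with hs'
      set g' := (t.map Prod.snd).reverse with hg'
      have hls : s'.length = t.length := by simp [hs']
      have hlg : g'.length = t.length := by simp [hg']
      rw [shiftyA]
      have hglen : (g' ++ [b]).length = g'.length + 1 := by simp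
      have hcast : (((g' ++ [b]).length : Int)) - 1 = ((g'.length : Nat) : Int) := by
        simp
      have hcast' : (((s' ++ [a]).length : Int)) - 1 = ((s'.length : Nat) : Int) := by
        simp
      have hgetg : PySem.List.pyGet? (g' ++ [b]) (((g' ++ [b]).length : Int) - 1) = some b := by
        rw [hcast]; exact PySem.List.pyGet?_append_length g' [] b
      have hgets : PySem.List.pyGet? (s' ++ [a]) (((s' ++ [a]).length : Int) - 1) = some a := by
        rw [hcast']; exact PySem.List.pyGet?_append_length s' [] a
      have hd1 : ¬ (s' ++ [a]).length > (g' ++ [b]).length := by simp [hls, hlg]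
      have hd2 : ¬ (g' ++ [b]).length > (s' ++ [a]).length := by simp [hls, hlg]
      have hne : ¬ (g' ++ [b]).length = 0 := by simp
      simp only [hne, hd1, hd2, dif_neg, not_false_iff]
      by_cases hl : l < 0
      · simp [hl, altLoop]
      · simp only [hl, if_neg, not_false_iff, hgetg, hgets]
        rw [pv_slice_dropLast, pv_slice_dropLast, List.dropLast_concat, List.dropLast_concat]
        by_cases hab : a = b
        · simp only [hab, if_pos]
          rw [hs', hg', ih]
          simp [altLoop, hl]
        · have hne2 : ¬ (some b = some a) := by simp [Ne.symm hab]
          simp only [hne2, if_neg, not_false_iff]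
          rw [hs', hg', ih]
          have hR : altLoop ((a, b) :: t) 0 l = altLoop t (0 + 1) (l - 1) := by
            rw [altLoop]
            simp [hl, hab]
          rw [hR, altLoop_accum t (0 + 1) (l - 1)]
          ring
  
-- trimming start down to goal's length
theorem shiftyA_trim_start (k : Nat) :
    ∀ (s g : List Char) (l : Int), s.length = g.length + k → g ≠ [] →
      shiftyA s g l = shiftyA (s.take g.length) g (l - (k : Int)) + (k : Int) := by
  induction k with
  | zero =>
      intro s g l hlen _
      rw [List.take_of_length_le (by omega)]
      simp
  | succ k ih =>
      intro s g l hlen hg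
      have hgne : ¬ g.length = 0 := by simpa using hg
      have hgt : s.length > g.length := by omega
      rw [shiftyA]
      simp only [hgne, hgt, dif_neg, dif_pos, not_false_iff]
      rw [pv_slice_dropLast]
      have hdl : s.dropLast.length = g.length + k := by
        simp [List.length_dropLast]; omega
      rw [ih s.dropLast g (l - 1) hdl hg]
      have htk : s.dropLast.take g.length = s.take g.length := by
        rw [List.dropLast_eq_take, List.take_take]
        congr 1
        omega
      rw [htk]
      have : l - 1 - (k : Int) = l - ((k : Nat) + 1 : Int) := by ring
      rw [this]
      push_cast
      ring

-- trimming goal down to start's length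
theorem shiftyA_trim_goal (k : Nat) :
    ∀ (s g : List Char) (l : Int), g.length = s.length + k →
      shiftyA s g l = shiftyA s (g.take s.length) (l - (k : Int)) + (k : Int) := by
  induction k with
  | zero =>
      intro s g l hlen
      rw [List.take_of_length_le (by omega)]
      simp
  | succ k ih =>
      intro s g l hlen
      have hgne : ¬ g.length = 0 := by omega
      have hns : ¬ s.length > g.length := by omega
      have hgt : g.length > s.length := by omega
      rw [shiftyA]
      simp only [hgne, hns, hgt, dif_neg, dif_pos, not_false_iff]
      rw [pv_slice_dropLast]
      have hdl : g.dropLast.length = s.length + k := by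
        simp [List.length_dropLast]; omega
      rw [ih s g.dropLast (l - 1) hdl]
      have htk : g.dropLast.take s.length = g.take s.length := by
        rw [List.dropLast_eq_take, List.take_take]
        congr 1
        omega
      rw [htk]
      have : l - 1 - (k : Int) = l - ((k : Nat) + 1 : Int) := by ring
      rw [this]
      push_cast
      ring

-- equal-length lists are the reversed zip's projections
theorem shiftyA_zip (s g : List Char) (l : Int) (h : s.length = g.length) :
    shiftyA s g l = altLoop (s.reverse.zip g.reverse) 0 l := by
  have hlen : s.reverse.length = g.reverse.length := by simp [h]
  have h1 : ((s.reverse.zip g.reverse).map Prod.fst) = s.reverse :=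
    List.map_fst_zip (le_of_eq hlen)
  have h2 : ((s.reverse.zip g.reverse).map Prod.snd) = g.reverse :=
    List.map_snd_zip (le_of_eq hlen.symm)
  have := shiftyA_eq_altLoop (s.reverse.zip g.reverse) l
  rw [h1, h2, List.reverse_reverse, List.reverse_reverse] at this
  exact this

-- ===== VERDICT (by name: the statement is the Claim_ definition above) =====
theorem shifty_shifts_spec : Claim_equal_shifty_shifts := by
  intro start goal limit _
  unfold Spec_shifty_shifts shifty_shifts shifty_shifts_alt
  set s := start.toList
  set g := goal.toList
  by_cases hg : g.length = 0
  · have : g = [] := List.length_eq_zero_iff.mp hg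
    simp [shiftyA, this]
  · simp only [hg, if_neg, not_false_iff]
    by_cases hsl : s.length ≥ g.length
    · -- start at least as long: trim start
      set k := s.length - g.length with hk
      have hlen : s.length = g.length + k := by omega
      have hgne : g ≠ [] := by
        intro h; rw [h] at hg; simp at hg
      rw [shiftyA_trim_start k s g limit hlen hgne]
      have heq : (s.take g.length).length = g.length := by
        simp; omega
      rw [shiftyA_zip _ _ _ heq]
      have hmin : min s.length g.length = g.length := by omega
      rw [hmin, List.take_length]
      have hcost : (s.length : Int) + (g.length : Int) - 2 * ((g.length : Nat) : Int) = (k : Int) := by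
        omega
      rw [hcost, altLoop_accum _ (k : Int) _]
      ring
    · -- goal longer: trim goal
      rw [not_le] at hsl
      set k := g.length - s.length with hk
      have hlen : g.length = s.length + k := by omega
      rw [shiftyA_trim_goal k s g limit hlen]
      have heq : s.length = (g.take s.length).length := by
        simp; omega
      rw [shiftyA_zip _ _ _ heq]
      have hmin : min s.length g.length = s.length := by omega
      rw [hmin, List.take_length]
      have hcost : (s.length : Int) + (g.length : Int) - 2 * ((s.length : Nat) : Int) = (k : Int) := by
        omega
      rw [hcost, altLoop_accum _ (k : Int) _]
      ring
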